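-- pv_equiv track=rewrite | github.com/matko-k/aoc_2023 | day_06/puzzle_06.py | find_winning_strategies
-- ===== SOURCE A (Python) =====
-- def find_winning_strategies(race):
--     total_time = race[0]
--     dist_to_beat = race[1]
--     win_strategies = []
--     for hold_time in range(total_time):
--         dist = hold_time * (total_time - hold_time)
--         if dist > dist_to_beat:
--             win_strategies.append((hold_time, dist))
--
--     return win_strategies
-- ===== SOURCE B (Python) =====
-- def _isqrt(n):
--     # floor square root of n >= 0 by binary search
--     lo, hi = 0, n + 1
--     while hi - lo > 1:
--         mid = (lo + hi) // 2
--         if mid * mid <= n: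
--             lo = mid
--         else:
--             hi = mid
--     return lo
--
--
-- def find_winning_strategies(race):
--     total_time, dist_to_beat = race
--     disc = total_time * total_time - 4 * dist_to_beat
--     if disc < 0:
--         return []
--     s = _isqrt(disc)
--     t = s if s * s < disc else s - 1   # largest t with t*t < disc
--     lo = max((total_time - t + 1) // 2, 0)
--     hi = min((total_time + t) // 2, total_time - 1)
--     return [(h, h * (total_time - h)) for h in range(lo, hi + 1)]
-- ===== Notes on version B (the rewrite author's own statement) =====
-- stated objective: alternative
-- what changed: B computes the winning hold-time interval analytically from the quadratic h*(T-h) > d via a binary-search integer square root of the discriminant and emits the pairs over that range with no per-element test, instead of scanning every hold_time in range(total_time).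
import Mathlib
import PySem

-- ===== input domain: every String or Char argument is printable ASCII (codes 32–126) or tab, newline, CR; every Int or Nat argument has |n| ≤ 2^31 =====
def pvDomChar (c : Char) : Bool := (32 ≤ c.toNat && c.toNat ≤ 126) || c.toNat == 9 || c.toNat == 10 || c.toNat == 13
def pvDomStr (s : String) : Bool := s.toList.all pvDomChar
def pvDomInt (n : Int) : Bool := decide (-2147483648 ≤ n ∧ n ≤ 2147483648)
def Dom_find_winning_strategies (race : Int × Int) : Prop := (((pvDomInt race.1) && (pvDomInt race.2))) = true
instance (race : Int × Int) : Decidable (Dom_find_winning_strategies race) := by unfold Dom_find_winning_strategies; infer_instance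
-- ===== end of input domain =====

-- B derives the interval of winning hold times analytically (integer square root of the
-- discriminant, binary search) instead of scanning all of range(total_time); objective: alternative algorithm.

-- ===== PORT A =====
def find_winning_strategies (race : Int × Int) : List (Int × Int) :=
  let total_time := race.1
  let dist_to_beat := race.2
  let win_strategies : List (Int × Int) := []
  (PySem.List.pyRange 0 total_time 1).foldl
    (fun acc hold_time =>
      let dist := hold_time * (total_time - hold_time)
      if dist > dist_to_beat then acc ++ [(hold_time, dist)] else acc)
    win_strategies

-- ===== PORT B =====
-- binary-search floor square root (_isqrt in Source B); loop state (lo, hi)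
def isqrtLoop (n lo hi : Int) : Int :=
  if hi - lo > 1 then
    let mid := PySem.Int.floordiv (lo + hi) 2
    if mid * mid ≤ n then isqrtLoop n mid hi else isqrtLoop n lo mid
  else lo
termination_by (hi - lo).toNat
decreasing_by
  · have hm : PySem.Int.floordiv (lo + hi) 2 = (lo + hi) / 2 :=
      PySem.Int.floordiv_eq_ediv_of_pos (by omega)
    simp only [hm]; omega
  · have hm : PySem.Int.floordiv (lo + hi) 2 = (lo + hi) / 2 :=
      PySem.Int.floordiv_eq_ediv_of_pos (by omega)
    simp only [hm]; omega

def find_winning_strategies_alt (race : Int × Int) : List (Int × Int) :=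
  let total_time := race.1
  let dist_to_beat := race.2
  let disc := total_time * total_time - 4 * dist_to_beat
  if disc < 0 then []
  else
    let s := isqrtLoop disc 0 (disc + 1)
    let t := if s * s < disc then s else s - 1
    let lo := max (PySem.Int.floordiv (total_time - t + 1) 2) 0
    let hi := min (PySem.Int.floordiv (total_time + t) 2) (total_time - 1)
    (PySem.List.pyRange lo (hi + 1) 1).map (fun h => (h, h * (total_time - h)))

-- ===== PRECONDITION & SPEC =====
def Spec_find_winning_strategies (race : Int × Int) (out : List (Int × Int)) : Prop := out = find_winning_strategies_alt race
instance (race : Int × Int) (out : List (Int × Int)) : Decidable (Spec_find_winning_strategies race out) := by unfold Spec_find_winning_strategies; infer_instance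

-- ===== CLAIM (what is proved, stated in full; the proofs are below) =====
def Claim_equal_find_winning_strategies : Prop := ∀ (race : Int × Int), Dom_find_winning_strategies race → Spec_find_winning_strategies race (find_winning_strategies race)

-- ===== LEMMAS AND PROOFS =====

-- the binary search returns the floor square root
theorem isqrtLoop_spec (n lo hi : Int) (hlo : 0 ≤ lo) (hl : lo * lo ≤ n)
    (hh : n < hi * hi) (hlh : lo < hi) :
    isqrtLoop n lo hi * isqrtLoop n lo hi ≤ n ∧
      n < (isqrtLoop n lo hi + 1) * (isqrtLoop n lo hi + 1) ∧ 0 ≤ isqrtLoop n lo hi := by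
  revert hlo hl hh hlh
  induction lo, hi using isqrtLoop.induct n with
  | case1 lo hi hgt mid hle ih =>
    intro hlo hl hh hlh
    have hm : mid = (lo + hi) / 2 := PySem.Int.floordiv_eq_ediv_of_pos (by omega)
    rw [isqrtLoop, if_pos hgt, if_pos hle]
    exact ih (by omega) hle hh (by omega)
  | case2 lo hi hgt mid hle ih =>
    intro hlo hl hh hlh
    have hm : mid = (lo + hi) / 2 := PySem.Int.floordiv_eq_ediv_of_pos (by omega)
    rw [isqrtLoop, if_pos hgt, if_neg hle]
    exact ih hlo hl (by omega) (by omega)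
  | case3 lo hi hgt =>
    intro hlo hl hh hlh
    rw [isqrtLoop, if_neg hgt]
    have : hi = lo + 1 := by omega
    subst this
    exact ⟨hl, hh, hlo⟩

-- winners are exactly the integer interval [⌈(T-t)/2⌉, ⌊(T+t)/2⌋]
theorem winner_iff (T d t h : Int) (ht2 : 0 ≤ t → t * t < T * T - 4 * d)
    (ht3 : T * T - 4 * d ≤ (t + 1) * (t + 1)) (htn : -1 ≤ t) :
    d < h * (T - h) ↔ (T - t ≤ 2 * h ∧ 2 * h ≤ T + t) := by
  constructor
  · intro hw
    have hk : (2 * h - T) * (2 * h - T) < (t + 1) * (t + 1) := by nlinarith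
    constructor <;> nlinarith [sq_nonneg (2 * h - T), sq_nonneg (t + 1)]
  · rintro ⟨h1, h2⟩
    have ht0 : 0 ≤ t := by omega
    have hd : t * t < T * T - 4 * d := ht2 ht0
    nlinarith [mul_nonneg (sub_nonneg.2 h2) (by omega : (0:Int) ≤ t - (T - 2 * h))]

theorem filter_range_interval (p : Int → Bool) (lo hi T : Int)
    (hchar : ∀ h : Int, 0 ≤ h → h < T → (p h = true ↔ lo ≤ h ∧ h ≤ hi))
    (hlo : 0 ≤ lo) (hhi : hi ≤ T - 1) :
    (PySem.List.pyRange 0 T 1).filter p = PySem.List.pyRange lo (hi + 1) 1 := by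
  by_cases hle : lo ≤ hi + 1
  · rw [PySem.List.pyRange_one_append 0 lo T hlo (by omega),
        PySem.List.pyRange_one_append lo (hi + 1) T hle (by omega),
        List.filter_append, List.filter_append]
    have h1 : (PySem.List.pyRange 0 lo 1).filter p = [] := by
      rw [List.filter_eq_nil_iff]
      intro h hmem
      rw [PySem.List.mem_pyRange_one] at hmem
      simp only [Bool.not_eq_true]
      rcases Bool.eq_false_or_eq_true (p h) with ht | hf
      · have := (hchar h (by omega) (by omega)).1 ht; omega
      · exact hf
    have h2 : (PySem.List.pyRange lo (hi + 1) 1).filter p = PySem.List.pyRange lo (hi + 1) 1 := by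
      rw [List.filter_eq_self]
      intro h hmem
      rw [PySem.List.mem_pyRange_one] at hmem
      exact (hchar h (by omega) (by omega)).2 (by omega)
    have h3 : (PySem.List.pyRange (hi + 1) T 1).filter p = [] := by
      rw [List.filter_eq_nil_iff]
      intro h hmem
      rw [PySem.List.mem_pyRange_one] at hmem
      simp only [Bool.not_eq_true]
      rcases Bool.eq_false_or_eq_true (p h) with ht | hf
      · have := (hchar h (by omega) (by omega)).1 ht; omega
      · exact hf
    rw [h1, h2, h3, List.nil_append, List.append_nil]
  · have hr : PySem.List.pyRange lo (hi + 1) 1 = [] := PySem.List.pyRange_one_eq_nil (by omega)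
    rw [hr, List.filter_eq_nil_iff]
    intro h hmem
    rw [PySem.List.mem_pyRange_one] at hmem
    simp only [Bool.not_eq_true]
    rcases Bool.eq_false_or_eq_true (p h) with ht | hf
    · have := (hchar h (by omega) (by omega)).1 ht; omega
    · exact hf

-- ===== VERDICT (by name: the statement is the Claim_ definition above) =====
theorem find_winning_strategies_spec : Claim_equal_find_winning_strategies := by
  intro race _
  obtain ⟨T, d⟩ := race
  unfold Spec_find_winning_strategies find_winning_strategies find_winning_strategies_alt
  simp only
  rw [show (fun (acc : List (Int × Int)) (hold_time : Int) =>
        let dist := hold_time * (T - hold_time)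
        if dist > d then acc ++ [(hold_time, dist)] else acc) =
      (fun acc h => if (decide (d < h * (T - h))) = true then
        acc ++ [(fun x => (x, x * (T - x))) h] else acc) from by
        funext acc h; simp]
  rw [PySem.List.foldl_append_if (fun h => decide (d < h * (T - h))) (fun x => (x, x * (T - x)))]
  rw [List.nil_append]
  by_cases hdisc : T * T - 4 * d < 0
  · rw [if_pos hdisc]
    have hnil : (PySem.List.pyRange 0 T 1).filter (fun h => decide (d < h * (T - h))) = [] := by
      rw [List.filter_eq_nil_iff]
      intro h _
      simp only [decide_eq_true_iff, not_lt] at *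
      nlinarith [sq_nonneg (2 * h - T)]
    rw [hnil, List.map_nil]
  · rw [if_neg hdisc]
    rw [not_lt] at hdisc
    set disc := T * T - 4 * d with hdef
    obtain ⟨hs1, hs2, hs3⟩ := isqrtLoop_spec disc 0 (disc + 1) le_rfl
      (by omega) (by nlinarith) (by omega)
    set s := isqrtLoop disc 0 (disc + 1) with hs
    set t : Int := if s * s < disc then s else s - 1 with ht
    have ht3 : disc ≤ (t + 1) * (t + 1) := by
      rw [ht]; split_ifs with h
      · omega
      · have hss : s * s = disc := by omega
        have he : s - 1 + 1 = s := by ring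
        rw [he, hss]
    have htn : -1 ≤ t := by rw [ht]; split_ifs <;> omega
    have ht2 : 0 ≤ t → t * t < disc := by
      intro h0
      rw [ht] at h0 ⊢; split_ifs at h0 ⊢ with h
      · exact h
      · have hss : s * s = disc := by omega
        nlinarith
    set lo := max (PySem.Int.floordiv (T - t + 1) 2) 0 with hlo
    set hi := min (PySem.Int.floordiv (T + t) 2) (T - 1) with hhi
    rw [filter_range_interval (fun h => decide (d < h * (T - h))) lo hi T ?_ (by omega) (by omega)]
    intro h h0 hT
    have hf1 : PySem.Int.floordiv (T - t + 1) 2 = (T - t + 1) / 2 :=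
      PySem.Int.floordiv_eq_ediv_of_pos (by omega)
    have hf2 : PySem.Int.floordiv (T + t) 2 = (T + t) / 2 :=
      PySem.Int.floordiv_eq_ediv_of_pos (by omega)
    have hw := winner_iff T d t h ht2 ht3 htn
    simp only [decide_eq_true_iff]
    rw [hw, hlo, hhi, hf1, hf2]
    omega
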